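-- pv_equiv track=rewrite | github.com/Azure/azure-cli | scripts/command_modules/_common.py | get_print_format
-- ===== SOURCE A (Python) =====
-- def get_print_format(records):
--     """
--     Find the best format to display the given list of records in table format
--     """
--     if not isinstance(records, list):
--         return None
--     elif len(records) == 0:
--         return None
--
--     size = len(records[0])
--     max_len = [0 for i in range(size)]
--
--     col_index = list(range(size))
--     for rec in records:
--         if len(rec) != size:
--             return None
--
--         for i in col_index:
--             max_len[i] = max(max_len[i], len(rec[i]))
--
--     recommend_format = ''
--     for each in max_len:
--         recommend_format += '{:' + str(each + 2) + '}'
--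
--     return (recommend_format, max_len)
-- ===== SOURCE B (Python) =====
-- def get_print_format(records):
--     """
--     Find the best format to display the given list of records in table format
--     """
--     if not isinstance(records, list) or not records:
--         return None
--     size = len(records[0])
--     if any(len(rec) != size for rec in records):
--         return None
--     # column-by-column: transpose the grid and take the max length of each column
--     max_len = [max(len(cell) for cell in col) for col in zip(*records)]
--     recommend_format = ''.join('{:' + str(w + 2) + '}' for w in max_len)
--     return (recommend_format, max_len)
-- ===== Notes on version B (the rewrite author's own statement) =====
-- stated objective: alternative
-- what changed: Replaces the row-by-row running max-array (nested loops mutating max_len) with a separate length-validation pass followed by a transpose via zip(*records) and a per-column max comprehension; the format string is built with ''.join instead of string accumulation.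
import Mathlib
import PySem

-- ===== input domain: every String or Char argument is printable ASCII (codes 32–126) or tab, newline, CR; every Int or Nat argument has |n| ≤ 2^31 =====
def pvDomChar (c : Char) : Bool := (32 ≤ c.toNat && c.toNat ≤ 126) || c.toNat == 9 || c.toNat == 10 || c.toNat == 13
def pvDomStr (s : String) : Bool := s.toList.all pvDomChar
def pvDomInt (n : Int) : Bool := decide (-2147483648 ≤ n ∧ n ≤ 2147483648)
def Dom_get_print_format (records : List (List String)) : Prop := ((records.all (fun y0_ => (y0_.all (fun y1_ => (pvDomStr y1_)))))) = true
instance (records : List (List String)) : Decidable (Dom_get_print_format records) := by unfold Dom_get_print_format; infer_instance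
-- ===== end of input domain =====

-- B replaces A's row-by-row running max-array with a validation pass plus a column-wise
-- (transposed) max computation; same cost, different decomposition (objective: alternative).


-- ===== PORT A =====
-- literal transliteration of A: running max-array updated row by row
def get_print_format (records : List (List String)) : Option (String × List Int) :=
  match records with
  | [] => none
  | r0 :: _ =>
    let size := r0.length
    let maxLen0 : List Int := List.replicate size 0
    -- for rec in records: if len(rec) != size: return None; for i in col_index: max_len[i] = ...
    let res : Option (List Int) :=
      records.foldl (fun acc rec =>
        match acc with
        | none => none
        | some ml =>
          if rec.length ≠ size then none
          else some ((List.range size).foldl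
              (fun ml i => ml.set i (max (ml.getD i 0) (((rec.getD i "").length : Int)))) ml))
        (some maxLen0)
    match res with
    | none => none
    | some maxLen =>
      let fmt := maxLen.foldl (fun s each => s ++ "{:" ++ PySem.Int.toStr (each + 2) ++ "}") ""
      some (fmt, maxLen)

-- ===== PORT B =====
-- max over a nonempty list (Python's max(head::tail)); [] branch is unreachable in B
def pvColMax (l : List Int) : Int :=
  match l with
  | [] => 0
  | c :: cs => cs.foldl max c

def get_print_format_alt (records : List (List String)) : Option (String × List Int) :=
  match records with
  | [] => none
  | r0 :: _ =>
    let size := r0.length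
    if records.any (fun rec => decide (rec.length ≠ size)) then none
    else
      -- transpose: column i is records.map (len of cell i); take its max
      let maxLen : List Int := (List.range size).map
        (fun i => pvColMax (records.map (fun rec => (((rec.getD i "").length : Int)))))
      let fmt := String.join (maxLen.map (fun w => "{:" ++ PySem.Int.toStr (w + 2) ++ "}"))
      some (fmt, maxLen)

-- ===== PRECONDITION & SPEC =====
def Spec_get_print_format (records : List (List String)) (out : Option (String × List Int)) : Prop := out = get_print_format_alt records
instance (records : List (List String)) (out : Option (String × List Int)) : Decidable (Spec_get_print_format records out) := by unfold Spec_get_print_format; infer_instance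

-- ===== CLAIM (what is proved, stated in full; the proofs are below) =====
def Claim_equal_get_print_format : Prop := ∀ (records : List (List String)), Dom_get_print_format records → Spec_get_print_format records (get_print_format records)

-- ===== LEMMAS AND PROOFS =====

-- cell-length abbreviation used only by the proofs
def pvLenI (rec : List String) (i : Nat) : Int := ((rec.getD i "").length : Int)

theorem pvLenI_def (rec : List String) (i : Nat) :
    (((rec.getD i "").length : Int)) = pvLenI rec i := rfl

theorem pv_mapIdx_id (ml : List Int) : ml.mapIdx (fun _ m => m) = ml := by
  apply List.ext_getElem <;> simp

-- the inner row loop is a pointwise max over the first n indices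
theorem pv_inner_fold (rec : List String) (n : Nat) (ml : List Int) (hn : n ≤ ml.length) :
    (List.range n).foldl (fun ml i => ml.set i (max (ml.getD i 0) (pvLenI rec i))) ml
      = ml.mapIdx (fun i m => if i < n then max m (pvLenI rec i) else m) := by
  induction n with
  | zero =>
    simp [pv_mapIdx_id]
  | succ n ih =>
    rw [List.range_succ, List.foldl_append, ih (by omega)]
    apply List.ext_getElem
    · simp
    · intro j hj hj'
      have hget : (ml.mapIdx fun i m => if i < n then max m (pvLenI rec i) else m).getD n 0
          = ml[n]'(by omega) := by
        rw [List.getD_eq_getElem _ _ (by simpa using (by omega : n < ml.length))]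
        simp
      simp only [List.foldl_cons, List.foldl_nil, hget, List.getElem_set, List.getElem_mapIdx]
      by_cases h : n = j
      · subst h
        simp [show n < n + 1 by omega]
      · rw [if_neg h]
        by_cases h2 : j < n
        · rw [if_pos h2, if_pos (by omega)]
        · rw [if_neg h2, if_neg (by omega)]

-- running column accumulator (A's view of column i after the rows recs)
def pvColAcc (recs : List (List String)) (m : Int) (i : Nat) : Int :=
  recs.foldl (fun m rec => max m (pvLenI rec i)) m

theorem pv_foldl_none {α β : Type} (f : Option β → α → Option β)
    (h : ∀ a, f none a = none) (l : List α) : l.foldl f none = none := by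
  induction l with
  | nil => rfl
  | cons a l ih => simp [h, ih]

theorem pv_outer_fold (size : Nat) (recs : List (List String)) (ml : List Int)
    (hml : ml.length = size) :
    recs.foldl (fun acc rec =>
        match acc with
        | none => none
        | some ml =>
          if rec.length ≠ size then none
          else some ((List.range size).foldl
              (fun ml i => ml.set i (max (ml.getD i 0) (pvLenI rec i))) ml))
      (some ml)
      = (if recs.any (fun rec => decide (rec.length ≠ size)) then none
         else some (ml.mapIdx (fun i m => pvColAcc recs m i))) := by
  induction recs generalizing ml with
  | nil =>
    simp [pvColAcc, pv_mapIdx_id]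
  | cons r rs ih =>
    simp only [List.foldl_cons, List.any_cons]
    by_cases hr : r.length ≠ size
    · rw [if_pos hr, pv_foldl_none _ (fun _ => rfl) rs, if_pos (by simp [hr])]
    · simp only [if_neg hr]
      rw [pv_inner_fold r size ml (by omega)]
      have hlen : (ml.mapIdx fun i m => if i < size then max m (pvLenI r i) else m).length = size := by
        simpa using hml
      rw [ih _ hlen]
      have heq : (ml.mapIdx fun i m => if i < size then max m (pvLenI r i) else m)
          = ml.mapIdx fun i m => max m (pvLenI r i) := by
        apply List.ext_getElem
        · simp
        · intro j hj _
          simp only [List.getElem_mapIdx]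
          have : j < size := by simp at hj; omega
          simp [this]
      rw [heq]
      simp only [hr, decide_false, Bool.false_or]
      split
      · rfl
      · congr 1
        rw [List.mapIdx_mapIdx]
        rfl

theorem pv_replicate_mapIdx (size : Nat) (f : Nat → Int → Int) :
    (List.replicate size (0 : Int)).mapIdx f = (List.range size).map (fun i => f i 0) := by
  apply List.ext_getElem <;> simp

theorem pv_col (r0 : List String) (rest : List (List String)) (i : Nat) :
    pvColAcc (r0 :: rest) 0 i = pvColMax ((r0 :: rest).map (fun rec => pvLenI rec i)) := by
  show rest.foldl (fun m rec => max m (pvLenI rec i)) (max 0 (pvLenI r0 i))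
      = pvColMax ((r0 :: rest).map (fun rec => pvLenI rec i))
  rw [max_eq_right (by exact Int.natCast_nonneg _)]
  simp [pvColMax, List.foldl_map]

theorem pv_fmt (ws : List Int) :
    ws.foldl (fun s each => s ++ "{:" ++ PySem.Int.toStr (each + 2) ++ "}") ""
      = String.join (ws.map (fun w => "{:" ++ PySem.Int.toStr (w + 2) ++ "}")) := by
  simp [String.join, List.foldl_map, String.append_assoc]

theorem pv_main (records : List (List String)) :
    get_print_format records = get_print_format_alt records := by
  cases records with
  | nil => rfl
  | cons r0 rest =>
    simp only [get_print_format, get_print_format_alt, pvLenI_def]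
    rw [pv_outer_fold r0.length (r0 :: rest) _ (by simp)]
    cases h : (r0 :: rest).any (fun rec => decide (rec.length ≠ r0.length)) with
    | true => simp only [if_true]
    | false =>
      simp only [Bool.false_eq_true, if_false]
      rw [pv_replicate_mapIdx]
      have hw : ((List.range r0.length).map (fun i => pvColAcc (r0 :: rest) 0 i))
          = (List.range r0.length).map
              (fun i => pvColMax ((r0 :: rest).map (fun rec => pvLenI rec i))) := by
        apply List.map_congr_left
        intro i _
        exact pv_col r0 rest i
      rw [hw, pv_fmt]

theorem get_print_format_spec : Claim_equal_get_print_format := by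
  intro records _
  unfold Spec_get_print_format
  exact pv_main records
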